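-- pv_equiv track=rewrite | github.com/hacdias/LEIC | 5 Semana/ex4.py | num_para_seq_cod
-- ===== SOURCE A (Python) =====
-- def num_para_seq_cod(num):
--     tpl = ()
--
--     while num != 0:
--         d = num % 10
--         num = num // 10
--
--         if d % 2 == 0:
--             d = d + 2
--             if d > 8:
--                 d = 0
--         else:
--             d = d - 2
--             if d < 1:
--                 d = 9
--
--         tpl = (d, ) + tpl
--
--     return tpl
-- ===== SOURCE B (Python) =====
-- def num_para_seq_cod(num):
--     if num == 0:
--         return ()
--
--     def t(d):
--         if d % 2 == 0:
--             return 0 if d == 8 else d + 2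
--         return 9 if d == 1 else d - 2
--
--     return tuple(t(ord(ch) - 48) for ch in str(num))
-- ===== Notes on version B (the rewrite author's own statement) =====
-- stated objective: idiomatic
-- what changed: B maps the even/odd digit transform over the decimal string str(num) in forward order (with a zero guard) instead of A's divmod extraction loop that prepends to a tuple.
import Mathlib
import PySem

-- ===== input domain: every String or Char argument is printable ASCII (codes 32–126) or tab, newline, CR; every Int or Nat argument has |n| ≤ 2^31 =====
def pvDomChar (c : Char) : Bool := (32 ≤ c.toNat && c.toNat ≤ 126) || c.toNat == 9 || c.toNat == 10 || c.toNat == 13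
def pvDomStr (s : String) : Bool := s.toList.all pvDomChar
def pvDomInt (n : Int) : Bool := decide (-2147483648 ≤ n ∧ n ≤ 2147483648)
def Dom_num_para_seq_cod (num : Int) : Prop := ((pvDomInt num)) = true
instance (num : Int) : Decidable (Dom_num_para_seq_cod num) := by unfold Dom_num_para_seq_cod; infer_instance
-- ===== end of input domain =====

-- B maps the even/odd digit transform over the decimal string of num (zero-guarded, forward
-- order) instead of A's divmod extraction loop that prepends to a tuple; objective: idiomatic.

-- ===== PORT A =====
-- A's while loop; the Python guard is `num != 0`, but on negative num the loop never terminates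
-- (num // 10 stays at -1), so the recursion is guarded by `0 < num` for totality — identical
-- behaviour on Pre_ (0 ≤ num), which excludes exactly the diverging inputs.
def pvLoopA (num : Int) (tpl : List Int) : List Int :=
  if h : 0 < num then
    let d := PySem.Int.mod num 10
    let num' := PySem.Int.floordiv num 10
    let d' := if PySem.Int.mod d 2 = 0 then (if d + 2 > 8 then (0 : Int) else d + 2)
              else (if d - 2 < 1 then (9 : Int) else d - 2)
    pvLoopA num' (d' :: tpl)
  else tpl
termination_by num.toNat
decreasing_by
  rw [PySem.Int.floordiv_eq_ediv_of_pos (by omega)]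
  omega

def num_para_seq_cod (num : Int) : List Int := pvLoopA num []

-- ===== PORT B =====
-- Source B's helper t
def pvT (d : Int) : Int :=
  if PySem.Int.mod d 2 = 0 then (if d = 8 then 0 else d + 2)
  else (if d = 1 then 9 else d - 2)

-- `ord(ch) - 48` is exactly ch.toNat - 48; str(num) is PySem.Int.toChars
def num_para_seq_cod_alt (num : Int) : List Int :=
  if num == 0 then []
  else (PySem.Int.toChars num).map (fun ch => pvT ((ch.toNat : Int) - 48))

-- ===== PRECONDITION & SPEC =====
-- Pre_ excludes negative num, on which Python's A never returns (infinite loop: num // 10 → -1).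
def Pre_num_para_seq_cod (num : Int) : Prop := 0 ≤ num
instance (num : Int) : Decidable (Pre_num_para_seq_cod num) := by unfold Pre_num_para_seq_cod; infer_instance
def pvWitness_num_para_seq_cod : Int := (246801357 : Int)

def Spec_num_para_seq_cod (num : Int) (out : List Int) : Prop := out = num_para_seq_cod_alt num
instance (num : Int) (out : List Int) : Decidable (Spec_num_para_seq_cod num out) := by unfold Spec_num_para_seq_cod; infer_instance

-- ===== CLAIM (what is proved, stated in full; the proofs are below) =====
def Claim_equal_num_para_seq_cod : Prop := ∀ (num : Int), Dom_num_para_seq_cod num → Pre_num_para_seq_cod num → Spec_num_para_seq_cod num (num_para_seq_cod num)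

-- ===== LEMMAS AND PROOFS =====

-- per-digit agreement between B's char-wise transform and A's arithmetic transform
theorem pvConv_digitChar (d : Nat) (hd : d < 10) :
    pvT ((Nat.digitChar d).toNat - (48 : Int)) =
      (if PySem.Int.mod (d : Int) 2 = 0 then (if (d : Int) + 2 > 8 then (0 : Int) else (d : Int) + 2)
       else (if (d : Int) - 2 < 1 then (9 : Int) else (d : Int) - 2)) := by
  interval_cases d <;> decide

theorem pvLoopA_pos (num : Int) (tpl : List Int) (h : 0 < num) :
    pvLoopA num tpl =
      pvLoopA (PySem.Int.floordiv num 10)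
        ((if PySem.Int.mod (PySem.Int.mod num 10) 2 = 0 then
            (if PySem.Int.mod num 10 + 2 > 8 then (0 : Int) else PySem.Int.mod num 10 + 2)
          else (if PySem.Int.mod num 10 - 2 < 1 then (9 : Int) else PySem.Int.mod num 10 - 2)) :: tpl) := by
  rw [pvLoopA]
  simp [h]

theorem pvLoopA_zero (tpl : List Int) : pvLoopA 0 tpl = tpl := by
  rw [pvLoopA]; simp

-- the mapped toDigitsCore output is exactly A's loop result
theorem pvCore_map (fuel : Nat) : ∀ (n : Nat) (ds : List Char), 0 < n → n < fuel →
    (Nat.toDigitsCore 10 fuel n ds).map (fun ch => pvT ((ch.toNat : Int) - 48)) =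
      pvLoopA (n : Int) (ds.map (fun ch => pvT ((ch.toNat : Int) - 48))) := by
  induction fuel with
  | zero => intro n ds hn hf; omega
  | succ f ih =>
    intro n ds hn hf
    have hfd : PySem.Int.floordiv (n : Int) 10 = ((n / 10 : Nat) : Int) := by
      exact_mod_cast PySem.Int.floordiv_natCast n 10
    have hmd : PySem.Int.mod (n : Int) 10 = ((n % 10 : Nat) : Int) := by
      exact_mod_cast PySem.Int.mod_natCast n 10
    rw [pvLoopA_pos (n : Int) _ (by exact_mod_cast hn)]
    rw [hfd, hmd]
    rw [Nat.toDigitsCore]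
    by_cases h10 : n / 10 = 0
    · simp only [h10, reduceIte]
      rw [List.map_cons, pvConv_digitChar (n % 10) (Nat.mod_lt n (by omega))]
      rw [Nat.cast_zero, pvLoopA_zero]
    · simp only [h10, reduceIte]
      rw [ih (n / 10) _ (by omega) (by omega)]
      rw [List.map_cons, pvConv_digitChar (n % 10) (Nat.mod_lt n (by omega))]

-- ===== VERDICT (by name: the statement is the Claim_ definition above) =====
theorem num_para_seq_cod_spec : Claim_equal_num_para_seq_cod := by
  intro num _ hpre
  unfold Spec_num_para_seq_cod num_para_seq_cod num_para_seq_cod_alt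
  by_cases h0 : num = 0
  · subst h0; simp [pvLoopA_zero]
  · have hpos : 0 < num := lt_of_le_of_ne hpre (Ne.symm h0)
    rw [if_neg (by simpa using h0)]
    obtain ⟨n, rfl⟩ : ∃ n : Nat, num = (n : Int) := ⟨num.toNat, (Int.toNat_of_nonneg hpre).symm⟩
    have hn : 0 < n := by exact_mod_cast hpos
    unfold PySem.Int.toChars
    rw [if_neg (by omega)]
    have : ((n : Int)).toNat = n := Int.toNat_natCast n
    rw [this]
    unfold Nat.toDigits
    rw [pvCore_map (n + 1) n [] hn (by omega)]
    rfl
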